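-- pv_equiv track=rewrite | github.com/nadimra/competitive-programming | other/maxAggTempChange.py | maxAggTempChange
-- ===== SOURCE A (Python) =====
-- def maxAggTempChange(a):
--     currentMaxAgg = 0
--     for i in range(0,len(a)):
--         left = sum(a[0:i+1])
--         right = sum(a[i:len(a)])
--         current = max(left,right)
--         currentMaxAgg = max(currentMaxAgg,current)
--     return currentMaxAgg
-- ===== SOURCE B (Python) =====
-- def maxAggTempChange(a):
--     total = sum(a)
--     p = 0
--     best = 0
--     for x in a:
--         p += x
--         best = max(best, p, total - (p - x))
--     return best
-- ===== Notes on version B (the rewrite author's own statement) =====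
-- stated objective: faster
-- what changed: replaces the per-index re-summation of both slices by a single pass maintaining a running prefix sum and the precomputed total (right sum = total - previous prefix)
import Mathlib
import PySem

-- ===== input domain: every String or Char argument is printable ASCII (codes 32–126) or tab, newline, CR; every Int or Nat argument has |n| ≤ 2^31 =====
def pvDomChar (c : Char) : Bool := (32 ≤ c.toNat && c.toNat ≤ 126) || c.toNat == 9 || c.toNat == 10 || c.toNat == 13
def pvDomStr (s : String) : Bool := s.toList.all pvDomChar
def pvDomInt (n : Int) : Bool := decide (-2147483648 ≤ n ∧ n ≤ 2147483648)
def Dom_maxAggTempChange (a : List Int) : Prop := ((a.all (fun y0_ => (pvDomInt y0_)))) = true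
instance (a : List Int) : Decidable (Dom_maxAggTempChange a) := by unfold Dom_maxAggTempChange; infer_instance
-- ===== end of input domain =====

-- B is a single pass with a running prefix sum and the precomputed total (faster: O(n) vs A's O(n²)).

-- ===== PORT A =====
def maxAggTempChange (a : List Int) : Int :=
  (List.range a.length).foldl (fun (currentMaxAgg : Int) (i : Nat) =>
    let left := (PySem.List.slice a (some 0) (some ((i : Int) + 1))).sum
    let right := (PySem.List.slice a (some (i : Int)) (some (a.length : Int))).sum
    let current := max left right
    max currentMaxAgg current) 0

-- ===== PORT B =====
def maxAggTempChange_alt (a : List Int) : Int :=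
  let total := a.sum
  (a.foldl (fun (s : Int × Int) x =>
      let p := s.1 + x
      (p, max s.2 (max p (total - (p - x))))) (0, 0)).2

-- ===== PRECONDITION & SPEC =====
def Spec_maxAggTempChange (a : List Int) (out : Int) : Prop := out = maxAggTempChange_alt a
instance (a : List Int) (out : Int) : Decidable (Spec_maxAggTempChange a out) := by unfold Spec_maxAggTempChange; infer_instance

-- ===== CLAIM (what is proved, stated in full; the proofs are below) =====
def Claim_equal_maxAggTempChange : Prop := ∀ (a : List Int), Dom_maxAggTempChange a → Spec_maxAggTempChange a (maxAggTempChange a)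

-- ===== LEMMAS AND PROOFS =====

-- B's single pass, started at prefix p and best b, equals the index fold over prefix sums.
theorem bloop_eq_range (a : List Int) : ∀ (t p b : Int),
    (a.foldl (fun (s : Int × Int) x =>
        let q := s.1 + x
        (q, max s.2 (max q (t - (q - x))))) (p, b)).2
    = (List.range a.length).foldl
        (fun cur i => max cur (max (p + (a.take (i+1)).sum) (t - (p + (a.take i).sum)))) b := by
  induction a with
  | nil => intro t p b; simp
  | cons x xs ih =>
      intro t p b
      simp only [List.foldl_cons, List.length_cons, List.range_succ_eq_map,
        List.foldl_cons, List.foldl_map, List.take_succ_cons, List.sum_cons,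
        List.take_zero, List.sum_nil, add_zero]
      rw [ih]
      congr 1
      · funext cur i
        simp [Nat.succ_eq_add_one, add_assoc]
      · simp

theorem maxAggTempChange_as_range (a : List Int) :
    maxAggTempChange a
    = (List.range a.length).foldl
        (fun cur i => max cur (max ((a.take (i+1)).sum) ((a.drop i).sum))) 0 := by
  unfold maxAggTempChange
  apply List.foldl_ext
  intro cur i _
  have hl : PySem.List.slice a (some 0) (some ((i : Int) + 1)) = a.take (i+1) := by
    have : ((i : Int) + 1) = ((i + 1 : Nat) : Int) := by push_cast; ring
    rw [this, PySem.List.slice_zero_start, PySem.List.slice_to_natCast]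
  have hr : PySem.List.slice a (some (i : Int)) (some (a.length : Int)) = a.drop i := by
    rw [PySem.List.slice_natCast]
    exact List.take_of_length_le (by simp)
  simp [hl, hr]

theorem drop_sum_eq (a : List Int) (i : ℕ) : (a.drop i).sum = a.sum - (a.take i).sum := by
  have h : a.sum = (a.take i).sum + (a.drop i).sum := by
    rw [← List.sum_append, List.take_append_drop]
  omega

-- ===== VERDICT (by name: the statement is the Claim_ definition above) =====
theorem maxAggTempChange_spec : Claim_equal_maxAggTempChange := by
  intro a _
  unfold Spec_maxAggTempChange maxAggTempChange_alt
  rw [maxAggTempChange_as_range, bloop_eq_range a a.sum 0 0]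
  apply List.foldl_ext
  intro cur i _
  rw [drop_sum_eq]
  simp
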